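-- pv_equiv track=rewrite | github.com/carlabg/Challenge4_crypto | generate_shares.py | lagrange_interpolate_at_zero
-- ===== SOURCE A (Python) =====
-- FIELD_PRIME = 0xFFFFFFFFFFFFFFFFFFFFFFFFFFFFFFFFFFFFFFFFFFFFFFFFFFFFFFFEFFFFFC2F
--
-- def mod_inverse(a: int, p: int) -> int:
--     """Modular inverse using Fermat's little theorem: a^(p-2) mod p."""
--     return pow(a, p - 2, p)
--
-- def lagrange_interpolate_at_zero(shares: list[tuple[int, int]]) -> int:
--     """
--     Reconstruct f(0) from shares using Lagrange interpolation.
--     shares: list of (x, y) tuples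
--     Returns: the secret f(0)
--     """
--     secret = 0
--     n = len(shares)
--
--     for i in range(n):
--         xi, yi = shares[i]
--
--         # Compute Lagrange basis polynomial L_i(0)
--         li = 1
--         for j in range(n):
--             if i == j:
--                 continue
--             xj = shares[j][0]
--
--             numerator = (0 - xj) % FIELD_PRIME          # (0 - xj) mod p
--             denominator = (xi - xj) % FIELD_PRIME        # (xi - xj) mod p
--             factor = (numerator * mod_inverse(denominator, FIELD_PRIME)) % FIELD_PRIME
--             li = (li * factor) % FIELD_PRIME
--
--         secret = (secret + yi * li) % FIELD_PRIME
--
--     return secret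
-- ===== SOURCE B (Python) =====
-- FIELD_PRIME = 0xFFFFFFFFFFFFFFFFFFFFFFFFFFFFFFFFFFFFFFFFFFFFFFFFFFFFFFFEFFFFFC2F
--
-- def lagrange_interpolate_at_zero(shares):
--     """One modular inversion per share (pow(den, p-2, p) on the accumulated
--     denominator product) instead of one per (i, j) pair."""
--     p = FIELD_PRIME
--     secret = 0
--     for i, (xi, yi) in enumerate(shares):
--         num = 1
--         den = 1
--         for j, (xj, _y) in enumerate(shares):
--             if j == i:
--                 continue
--             num = num * (0 - xj) % p
--             den = den * (xi - xj) % p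
--         li = num * pow(den, p - 2, p) % p
--         secret = (secret + yi * li) % p
--     return secret
-- ===== Notes on version B (the rewrite author's own statement) =====
-- stated objective: faster
-- what changed: Instead of computing a modular inverse (a 256-bit modular exponentiation) for every pair (i,j), B accumulates the numerator and denominator products over j and performs a single modular inversion per share i; the results agree by multiplicativity of x^(p-2) mod p (also when some denominator is 0, where both give li = 0).
import Mathlib
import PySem

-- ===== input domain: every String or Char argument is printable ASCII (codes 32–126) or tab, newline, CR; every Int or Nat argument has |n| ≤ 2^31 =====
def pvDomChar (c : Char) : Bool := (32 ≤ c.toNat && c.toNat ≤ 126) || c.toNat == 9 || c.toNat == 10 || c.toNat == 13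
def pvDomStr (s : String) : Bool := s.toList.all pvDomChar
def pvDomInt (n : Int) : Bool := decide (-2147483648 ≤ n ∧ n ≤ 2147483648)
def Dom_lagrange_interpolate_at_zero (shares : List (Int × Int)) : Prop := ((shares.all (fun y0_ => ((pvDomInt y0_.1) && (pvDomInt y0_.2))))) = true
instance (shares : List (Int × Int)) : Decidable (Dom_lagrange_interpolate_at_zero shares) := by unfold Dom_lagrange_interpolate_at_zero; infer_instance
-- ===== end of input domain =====

-- B replaces the per-pair modular inversion of A by one accumulated-product inversion per share (same value by multiplicativity of x^(p-2) mod p).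

-- FIELD_PRIME (secp256k1 field prime)
def pvP : Int := 115792089237316195423570985008687907853269984665640564039457584007908834671663

-- Executable square-and-multiply modular exponentiation: Python's three-argument
-- pow(b, e, m) for e ≥ 0, m > 0 (PySem.Int.powMod is definitionally b^e % m and
-- cannot be evaluated for e = p-2; pvPowMod_eq below proves this equals b^e % m).
def pvPowMod (b : Int) (e : Nat) (m : Int) : Int :=
  if e = 0 then PySem.Int.mod 1 m
  else
    let h := pvPowMod b (e / 2) m
    let h2 := PySem.Int.mod (h * h) m
    if e % 2 = 1 then PySem.Int.mod (h2 * PySem.Int.mod b m) m else h2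
termination_by e
decreasing_by exact Nat.div_lt_self (Nat.pos_of_ne_zero (by assumption)) one_lt_two

-- ===== PORT A =====
-- mod_inverse(a, p) = pow(a, p - 2, p)
def mod_inverse (a : Int) (p : Int) : Int := pvPowMod a (p - 2).toNat p

def lagrange_interpolate_at_zero (shares : List (Int × Int)) : Int :=
  (PySem.List.enumerate shares).foldl (fun secret pr =>
    let xi := pr.2.1
    let yi := pr.2.2
    let li := (PySem.List.enumerate shares).foldl (fun li q =>
      if pr.1 = q.1 then li
      else
        let xj := q.2.1
        let numerator := PySem.Int.mod (0 - xj) pvP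
        let denominator := PySem.Int.mod (xi - xj) pvP
        let factor := PySem.Int.mod (numerator * mod_inverse denominator pvP) pvP
        PySem.Int.mod (li * factor) pvP) 1
    PySem.Int.mod (secret + yi * li) pvP) 0

-- ===== PORT B =====
def lagrange_interpolate_at_zero_alt (shares : List (Int × Int)) : Int :=
  (PySem.List.enumerate shares).foldl (fun secret pr =>
    let xi := pr.2.1
    let yi := pr.2.2
    let nd := (PySem.List.enumerate shares).foldl (fun nd q =>
      if q.1 = pr.1 then nd
      else (PySem.Int.mod (nd.1 * (0 - q.2.1)) pvP,
            PySem.Int.mod (nd.2 * (xi - q.2.1)) pvP)) (1, 1)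
    let li := PySem.Int.mod (nd.1 * pvPowMod nd.2 (pvP - 2).toNat pvP) pvP
    PySem.Int.mod (secret + yi * li) pvP) 0

-- ===== PRECONDITION & SPEC =====
def Spec_lagrange_interpolate_at_zero (shares : List (Int × Int)) (out : Int) : Prop := out = lagrange_interpolate_at_zero_alt shares
instance (shares : List (Int × Int)) (out : Int) : Decidable (Spec_lagrange_interpolate_at_zero shares out) := by unfold Spec_lagrange_interpolate_at_zero; infer_instance

-- ===== CLAIM (what is proved, stated in full; the proofs are below) =====
def Claim_equal_lagrange_interpolate_at_zero : Prop := ∀ (shares : List (Int × Int)), Dom_lagrange_interpolate_at_zero shares → Spec_lagrange_interpolate_at_zero shares (lagrange_interpolate_at_zero shares)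

-- ===== LEMMAS AND PROOFS =====

theorem pvP_pos : (0 : Int) < pvP := by unfold pvP; norm_num

theorem pvmod (x : Int) : PySem.Int.mod x pvP = x % pvP :=
  PySem.Int.mod_eq_emod_of_pos pvP_pos

theorem modeq_emod (a n : Int) : a % n ≡ a [ZMOD n] :=
  Int.emod_emod_of_dvd a dvd_rfl

theorem pvPowMod_eq (b : Int) {m : Int} (hm : 0 < m) :
    ∀ e : Nat, pvPowMod b e m = b ^ e % m := by
  intro e
  induction e using Nat.strong_induction_on with
  | _ e ih =>
    rw [pvPowMod]
    by_cases h0 : e = 0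
    · simp [h0, PySem.Int.mod_eq_emod_of_pos hm]
    · have hlt : e / 2 < e := Nat.div_lt_self (Nat.pos_of_ne_zero h0) one_lt_two
      have hrec := ih (e / 2) hlt
      have hsq : b ^ (e / 2) % m * (b ^ (e / 2) % m) % m = b ^ (e / 2 + e / 2) % m := by
        conv_rhs => rw [pow_add, Int.mul_emod]
      simp only [h0, if_false, hrec, PySem.Int.mod_eq_emod_of_pos hm, hsq]
      by_cases hpar : e % 2 = 1
      · have he : e = e / 2 + e / 2 + 1 := by omega
        simp only [hpar, if_true]
        conv_rhs => rw [he, pow_succ, Int.mul_emod]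
      · have he : e / 2 + e / 2 = e := by omega
        simp only [hpar, if_false, he]

theorem prod_map_pow_int {α : Type} (l : List α) (f : α → Int) (E : Nat) :
    (l.map (fun x => f x ^ E)).prod = (l.map f).prod ^ E := by
  induction l with
  | nil => simp
  | cons x l ih => simp [ih, mul_pow]

-- the per-j factor of the mathematical (un-reduced) product
def pvFac (xi : Int) (E : Nat) (x : Int) : Int := (0 - x) * (xi - x) ^ E

-- A's inner loop, characterised modulo p
theorem innerA_eq (i xi : Int) (E : Nat)
    (l : List (Int × (Int × Int))) : ∀ acc : Int,
    (l.foldl (fun li q =>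
      if i = q.1 then li
      else PySem.Int.mod (li * PySem.Int.mod (PySem.Int.mod (0 - q.2.1) pvP *
            pvPowMod (PySem.Int.mod (xi - q.2.1) pvP) E pvP) pvP) pvP) acc) % pvP
      = (acc * (((l.filter (fun q => !(i == q.1))).map
          (fun q => pvFac xi E q.2.1)).prod)) % pvP := by
  induction l with
  | nil => intro acc; simp
  | cons q l ih =>
    intro acc
    by_cases h : i = q.1
    · have hb : (!(i == q.1)) = false := by simp [h]
      simp only [List.foldl_cons, List.filter_cons, hb, if_pos h,
        Bool.false_eq_true, if_false]
      exact ih acc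
    · have hb : (!(i == q.1)) = true := by simp [h]
      simp only [List.foldl_cons, List.filter_cons, hb, if_neg h, if_true,
        List.map_cons, List.prod_cons]
      rw [ih, ← mul_assoc]
      have hpow : pvPowMod (PySem.Int.mod (xi - q.2.1) pvP) E pvP
          ≡ (xi - q.2.1) ^ E [ZMOD pvP] := by
        rw [pvPowMod_eq _ pvP_pos, pvmod]
        exact (modeq_emod _ _).trans ((modeq_emod _ _).pow E)
      have hcore : PySem.Int.mod (acc * PySem.Int.mod (PySem.Int.mod (0 - q.2.1) pvP *
            pvPowMod (PySem.Int.mod (xi - q.2.1) pvP) E pvP) pvP) pvP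
          ≡ acc * pvFac xi E q.2.1 [ZMOD pvP] := by
        rw [pvmod, pvmod, pvmod]
        unfold pvFac
        exact (modeq_emod _ _).trans ((Int.ModEq.refl acc).mul
          ((modeq_emod _ _).trans ((modeq_emod _ _).mul hpow)))
      exact hcore.mul (Int.ModEq.refl _)

-- B's inner loop: both accumulated products, characterised modulo p
theorem innerB_eq (i xi : Int)
    (l : List (Int × (Int × Int))) : ∀ a d : Int,
    (l.foldl (fun nd q =>
      if q.1 = i then nd
      else (PySem.Int.mod (nd.1 * (0 - q.2.1)) pvP,
            PySem.Int.mod (nd.2 * (xi - q.2.1)) pvP)) (a, d)).1 % pvP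
      = (a * ((l.filter (fun q => !(i == q.1))).map (fun q => 0 - q.2.1)).prod) % pvP
    ∧ (l.foldl (fun nd q =>
      if q.1 = i then nd
      else (PySem.Int.mod (nd.1 * (0 - q.2.1)) pvP,
            PySem.Int.mod (nd.2 * (xi - q.2.1)) pvP)) (a, d)).2 % pvP
      = (d * ((l.filter (fun q => !(i == q.1))).map (fun q => xi - q.2.1)).prod) % pvP := by
  induction l with
  | nil => intro a d; simp
  | cons q l ih =>
    intro a d
    by_cases h : i = q.1
    · have h' : q.1 = i := h.symm
      have hb : (!(i == q.1)) = false := by simp [h]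
      simp only [List.foldl_cons, List.filter_cons, hb, if_pos h',
        Bool.false_eq_true, if_false]
      exact ih a d
    · have h' : ¬ q.1 = i := fun hh => h hh.symm
      have hb : (!(i == q.1)) = true := by simp [h]
      simp only [List.foldl_cons, List.filter_cons, hb, if_neg h', if_true,
        List.map_cons, List.prod_cons]
      obtain ⟨ih1, ih2⟩ := ih (PySem.Int.mod (a * (0 - q.2.1)) pvP)
        (PySem.Int.mod (d * (xi - q.2.1)) pvP)
      constructor
      · rw [ih1, ← mul_assoc]
        refine Int.ModEq.mul ?_ (Int.ModEq.refl _)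
        rw [pvmod]
        exact modeq_emod _ _
      · rw [ih2, ← mul_assoc]
        refine Int.ModEq.mul ?_ (Int.ModEq.refl _)
        rw [pvmod]
        exact modeq_emod _ _

-- the two inner loops produce the same li contribution modulo p
theorem li_congr (i xi : Int) (l : List (Int × (Int × Int))) :
    (l.foldl (fun li q =>
      if i = q.1 then li
      else PySem.Int.mod (li * PySem.Int.mod (PySem.Int.mod (0 - q.2.1) pvP *
            mod_inverse (PySem.Int.mod (xi - q.2.1) pvP) pvP) pvP) pvP) 1) % pvP
    = PySem.Int.mod
        ((l.foldl (fun nd q =>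
          if q.1 = i then nd
          else (PySem.Int.mod (nd.1 * (0 - q.2.1)) pvP,
                PySem.Int.mod (nd.2 * (xi - q.2.1)) pvP)) (1, 1)).1 *
         pvPowMod ((l.foldl (fun nd q =>
          if q.1 = i then nd
          else (PySem.Int.mod (nd.1 * (0 - q.2.1)) pvP,
                PySem.Int.mod (nd.2 * (xi - q.2.1)) pvP)) (1, 1)).2)
          (pvP - 2).toNat pvP) pvP % pvP := by
  unfold mod_inverse
  obtain ⟨hN, hD⟩ := innerB_eq i xi l 1 1
  rw [one_mul] at hN hD
  have h1 := innerA_eq i xi (pvP - 2).toNat l 1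
  rw [one_mul] at h1
  rw [h1, pvmod, pvPowMod_eq _ pvP_pos]
  have halg : ((l.filter (fun q => !(i == q.1))).map
        (fun q => pvFac xi (pvP - 2).toNat q.2.1)).prod
      = ((l.filter (fun q => !(i == q.1))).map (fun q => 0 - q.2.1)).prod *
        ((l.filter (fun q => !(i == q.1))).map (fun q => xi - q.2.1)).prod
          ^ (pvP - 2).toNat := by
    rw [← prod_map_pow_int, ← List.prod_map_mul]
    simp [pvFac]
  rw [halg]
  exact ((modeq_emod _ _).trans
    ((Int.ModEq.trans hN (Int.ModEq.refl _)).mul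
      ((modeq_emod _ _).trans ((Int.ModEq.trans hD (Int.ModEq.refl _)).pow _)))).symm

-- ===== VERDICT (by name: the statement is the Claim_ definition above) =====
theorem lagrange_interpolate_at_zero_spec : Claim_equal_lagrange_interpolate_at_zero := by
  intro shares _
  unfold Spec_lagrange_interpolate_at_zero
  unfold lagrange_interpolate_at_zero lagrange_interpolate_at_zero_alt
  generalize PySem.List.enumerate shares = l
  congr 1
  funext s pr
  simp only []
  rw [pvmod, pvmod]
  have h := li_congr pr.1 pr.2.1 l
  exact (Int.ModEq.refl s).add ((Int.ModEq.refl pr.2.2).mul h)
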